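-- pv_equiv track=rewrite | github.com/bsinger98/caldera | loc.py | count_saved_lines
-- ===== SOURCE A (Python) =====
-- def count_saved_lines(lines, high_level_actions):
--     saved_lines = 0
--     for line in lines:
--         for key, value in high_level_actions.items():
--             if (key + ".run") in line:
--                 saved_lines += value
--                 break
--     return saved_lines
-- ===== SOURCE B (Python) =====
-- def count_saved_lines(lines, high_level_actions):
--     # Loop-inverted: iterate actions once, keep only still-unmatched lines between keys.
--     total = 0
--     pending = list(lines)
--     for key, value in high_level_actions.items():
--         pattern = key + ".run"
--         remaining = []
--         for line in pending:
--             if pattern in line: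
--                 total += value
--             else:
--                 remaining.append(line)
--         pending = remaining
--     return total
-- ===== Notes on version B (the rewrite author's own statement) =====
-- stated objective: alternative
-- what changed: Inverted the loop nest: B iterates the action items once in dict order, maintaining the list of still-unmatched lines and adding a key's value for every pending line containing key+'.run', instead of A's per-line scan over all keys with break; each key's pattern is also concatenated once per key instead of once per (line,key) pair.
import Mathlib
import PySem

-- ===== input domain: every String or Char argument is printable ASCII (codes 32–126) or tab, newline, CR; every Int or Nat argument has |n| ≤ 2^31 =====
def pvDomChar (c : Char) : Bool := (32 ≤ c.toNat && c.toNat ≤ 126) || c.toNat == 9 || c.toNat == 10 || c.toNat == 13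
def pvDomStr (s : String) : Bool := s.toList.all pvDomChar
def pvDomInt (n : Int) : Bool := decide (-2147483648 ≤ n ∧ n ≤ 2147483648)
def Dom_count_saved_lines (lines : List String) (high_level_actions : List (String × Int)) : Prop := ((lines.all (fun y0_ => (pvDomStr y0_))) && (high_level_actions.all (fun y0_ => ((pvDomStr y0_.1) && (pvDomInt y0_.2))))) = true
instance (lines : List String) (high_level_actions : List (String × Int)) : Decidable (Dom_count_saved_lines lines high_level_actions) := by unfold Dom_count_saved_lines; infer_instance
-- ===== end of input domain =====

-- ===== PORT A =====
-- One honest line: B inverts A's loop nest (actions outer, still-unmatched lines carried between keys); alternative structure, same results.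

-- inner 'for key, value in high_level_actions.items(): if key+".run" in line: += value; break'
def cslInner (line : String) : List (String × Int) → Int
  | [] => 0
  | (k, v) :: rest => if PySem.Str.isIn (k ++ ".run") line then v else cslInner line rest

def count_saved_lines (lines : List String) (high_level_actions : List (String × Int)) : Int :=
  lines.foldl (fun saved_lines line => saved_lines + cslInner line high_level_actions) 0

-- ===== PORT B =====
-- inner 'for line in pending: if pattern in line: total += value else: remaining.append(line)'
def cslStep (v : Int) (pat : String) (st : Int × List String) (line : String) : Int × List String :=
  if PySem.Str.isIn pat line then (st.1 + v, st.2) else (st.1, st.2 ++ [line])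

-- outer 'for key, value in high_level_actions.items(): ...; pending = remaining'
def cslOuter : Int × List String → List (String × Int) → Int × List String
  | st, [] => st
  | (total, pending), (k, v) :: rest =>
      cslOuter (pending.foldl (cslStep v (k ++ ".run")) (total, [])) rest

def count_saved_lines_alt (lines : List String) (high_level_actions : List (String × Int)) : Int :=
  (cslOuter (0, lines) high_level_actions).1

-- ===== PRECONDITION & SPEC =====
def Spec_count_saved_lines (lines : List String) (high_level_actions : List (String × Int)) (out : Int) : Prop := out = count_saved_lines_alt lines high_level_actions
instance (lines : List String) (high_level_actions : List (String × Int)) (out : Int) : Decidable (Spec_count_saved_lines lines high_level_actions out) := by unfold Spec_count_saved_lines; infer_instance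

-- ===== CLAIM (what is proved, stated in full; the proofs are below) =====
def Claim_equal_count_saved_lines : Prop := ∀ (lines : List String) (high_level_actions : List (String × Int)), Dom_count_saved_lines lines high_level_actions → Spec_count_saved_lines lines high_level_actions (count_saved_lines lines high_level_actions)

-- ===== LEMMAS AND PROOFS =====

-- B's inner pass: adds v per matched pending line, appends unmatched lines to the accumulator.
lemma cslStep_foldl (v : Int) (pat : String) :
    ∀ (pending : List String) (t : Int) (acc : List String),
      pending.foldl (cslStep v pat) (t, acc) =
        (t + (pending.map (fun l => if PySem.Str.isIn pat l then v else 0)).sum,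
         acc ++ pending.filter (fun l => ! PySem.Str.isIn pat l)) := by
  intro pending
  induction pending with
  | nil => intro t acc; simp
  | cons l tl ih =>
      intro t acc
      rw [List.foldl_cons]
      by_cases h : PySem.Chars.isIn pat.toList l.toList
      · simp [cslStep, h, ih, add_assoc]
      · simp [cslStep, h, ih]

-- splitting a first-match sum over the head key
lemma sum_split (p : String → Bool) (v : Int) (g : String → Int) :
    ∀ (L : List String),
      (L.map (fun l => if p l then v else g l)).sum =
        (L.map (fun l => if p l then v else 0)).sum +
          ((L.filter (fun l => ! p l)).map g).sum := by
  intro L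
  induction L with
  | nil => simp
  | cons l tl ih =>
      by_cases h : p l
      · simp [h, ih, add_assoc]
      · simp [h, ih]; ring

-- B's outer loop computes the per-line first-match sum of A.
lemma cslOuter_eq :
    ∀ (has : List (String × Int)) (t : Int) (pending : List String),
      (cslOuter (t, pending) has).1 =
        t + (pending.map (fun l => cslInner l has)).sum := by
  intro has
  induction has with
  | nil =>
      intro t pending
      simp [cslOuter, cslInner]
  | cons kv rest ih =>
      intro t pending
      obtain ⟨k, v⟩ := kv
      rw [cslOuter, cslStep_foldl, ih]
      simp only [cslInner, List.nil_append]
      rw [sum_split (fun l => PySem.Str.isIn (k ++ ".run") l) v (fun l => cslInner l rest)]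
      ring

-- A's fold is the same per-line sum.
lemma countA_eq (has : List (String × Int)) :
    ∀ (lines : List String) (a : Int),
      lines.foldl (fun saved_lines line => saved_lines + cslInner line has) a =
        a + (lines.map (fun l => cslInner l has)).sum := by
  intro lines
  induction lines with
  | nil => intro a; simp
  | cons l tl ih => intro a; simp [ih, add_assoc]

-- ===== VERDICT (by name: the statement is the Claim_ definition above) =====
theorem count_saved_lines_spec : Claim_equal_count_saved_lines := by
  intro lines has _
  show count_saved_lines lines has = count_saved_lines_alt lines has
  rw [count_saved_lines, count_saved_lines_alt, countA_eq, cslOuter_eq]
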